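-- pv_equiv track=rewrite | github.com/jlgridley/CrackingTheCodingInterview | 16.15-ctci.py | masterMind
-- ===== SOURCE A (Python) =====
-- def masterMind(guess, solution):
--     hits, pseudohits = 0, 0
--     solutionChars = {}
--     for i in range(len(guess)):
--         if guess[i] == solution[i]:
--             hits += 1
--         else:
--             if solution[i] not in solutionChars:
--                 solutionChars[solution[i]] = 0
--             solutionChars[solution[i]] += 1
--     for i in range(len(guess)):
--         if guess[i] != solution[i] and guess[i] in solutionChars:
--             pseudohits += 1
--             solutionChars[guess[i]] -= 1
--             if solutionChars[guess[i]] == 0: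
--                 del solutionChars[guess[i]]
--     return hits, pseudohits
-- ===== SOURCE B (Python) =====
-- def masterMind(guess, solution):
--     hits = sum(1 for i in range(len(guess)) if guess[i] == solution[i])
--     gms = [guess[i] for i in range(len(guess)) if guess[i] != solution[i]]
--     sms = [solution[i] for i in range(len(guess)) if guess[i] != solution[i]]
--     pseudohits = sum(min(gms.count(c), sms.count(c)) for c in set(gms))
--     return hits, pseudohits
-- ===== Notes on version B (the rewrite author's own statement) =====
-- stated objective: simpler
-- what changed: A builds one dict of solution-char counts and runs a second mutating pass that decrements/deletes entries while counting pseudohits; B has no mutable dict at all: it counts hits directly, collects the mismatched guess/solution chars into two lists by comprehension, and computes pseudohits as the multiset-intersection size sum(min(gms.count(c), sms.count(c)) for c in set(gms)).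
import Mathlib
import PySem

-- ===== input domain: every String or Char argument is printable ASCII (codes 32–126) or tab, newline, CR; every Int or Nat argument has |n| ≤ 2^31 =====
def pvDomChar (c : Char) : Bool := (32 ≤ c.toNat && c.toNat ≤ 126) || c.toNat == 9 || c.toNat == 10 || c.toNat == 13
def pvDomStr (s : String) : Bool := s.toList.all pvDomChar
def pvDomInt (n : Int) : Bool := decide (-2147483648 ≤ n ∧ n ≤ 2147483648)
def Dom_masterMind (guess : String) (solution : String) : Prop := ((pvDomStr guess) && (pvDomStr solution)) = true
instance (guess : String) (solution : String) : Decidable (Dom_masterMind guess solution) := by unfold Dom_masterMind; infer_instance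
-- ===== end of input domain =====

-- B replaces A's mutable count-dict and its second decrement/delete pass by two mismatch
-- lists and a closed multiset-intersection sum (objective: simpler; not faster).

-- ===== PORT A =====
def masterMind (guess : String) (solution : String) : Int × Int :=
  let g := guess.toList
  let s := solution.toList
  -- hits, pseudohits = 0, 0 ; solutionChars = {} ; first for-loop
  let st1 : Int × PySem.Dict Char Int :=
    (PySem.List.pyRange 0 (g.length : Int) 1).foldl (fun st i =>
      if PySem.List.pyGetD g i ' ' = PySem.List.pyGetD s i ' ' then
        (st.1 + 1, st.2)
      else
        let c := PySem.List.pyGetD s i ' '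
        let d := if st.2.contains c then st.2 else st.2.insert c 0
        (st.1, d.insert c (d.getD c 0 + 1))) (0, PySem.Dict.empty)
  -- second for-loop
  let st2 : Int × PySem.Dict Char Int :=
    (PySem.List.pyRange 0 (g.length : Int) 1).foldl (fun st i =>
      let c := PySem.List.pyGetD g i ' '
      if ¬ PySem.List.pyGetD g i ' ' = PySem.List.pyGetD s i ' ' ∧ st.2.contains c then
        let d := st.2.insert c (st.2.getD c 0 - 1)
        if d.getD c 0 = 0 then (st.1 + 1, d.erase c) else (st.1 + 1, d)
      else st) (0, st1.2)
  (st1.1, st2.1)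

-- ===== PORT B =====
def masterMind_alt (guess : String) (solution : String) : Int × Int :=
  let g := guess.toList
  let s := solution.toList
  let hits : Int := (((PySem.List.pyRange 0 (g.length : Int) 1).filter (fun i =>
      PySem.List.pyGetD g i ' ' == PySem.List.pyGetD s i ' ')).map (fun _ => (1 : Int))).sum
  let mism := (PySem.List.pyRange 0 (g.length : Int) 1).filter (fun i =>
      PySem.List.pyGetD g i ' ' != PySem.List.pyGetD s i ' ')
  let gms := mism.map (fun i => PySem.List.pyGetD g i ' ')
  let sms := mism.map (fun i => PySem.List.pyGetD s i ' ')
  let pseudohits : Int := ((PySem.Set.ofList gms).map (fun c =>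
      min ((gms.count c : Int)) ((sms.count c : Int)))).sum
  (hits, pseudohits)

-- ===== PRECONDITION & SPEC =====
-- Pre_ excludes exactly the inputs where A raises IndexError (solution shorter than guess);
-- B raises there too.
def Pre_masterMind (guess : String) (solution : String) : Prop :=
  guess.toList.length ≤ solution.toList.length
instance (guess : String) (solution : String) : Decidable (Pre_masterMind guess solution) := by
  unfold Pre_masterMind; infer_instance
def pvWitness_masterMind : String × String := ("RGBY", "GGRR")

def Spec_masterMind (guess : String) (solution : String) (out : Int × Int) : Prop := out = masterMind_alt guess solution
instance (guess : String) (solution : String) (out : Int × Int) : Decidable (Spec_masterMind guess solution out) := by unfold Spec_masterMind; infer_instance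

-- ===== CLAIM (what is proved, stated in full; the proofs are below) =====
def Claim_equal_masterMind : Prop := ∀ (guess : String) (solution : String), Dom_masterMind guess solution → Pre_masterMind guess solution → Spec_masterMind guess solution (masterMind guess solution)

-- ===== LEMMAS AND PROOFS =====

-- PySem.Dict has no erase lemmas in its book; these three are proved here.
theorem dict_get?_erase {κ ν : Type} [BEq κ] [LawfulBEq κ] [DecidableEq κ] (d : PySem.Dict κ ν) (k k' : κ) :
    (d.erase k).get? k' = if k' = k then none else d.get? k' := by
  obtain ⟨items⟩ := d
  induction items with
  | nil => simp [PySem.Dict.erase, PySem.Dict.get?]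
  | cons p rest ih =>
    simp only [PySem.Dict.erase, PySem.Dict.get?] at ih ⊢
    by_cases h1 : p.1 = k <;> by_cases h2 : p.1 = k' <;>
      simp_all

theorem dict_getD_erase {κ ν : Type} [BEq κ] [LawfulBEq κ] [DecidableEq κ] (d : PySem.Dict κ ν) (k k' : κ) (v : ν) :
    (d.erase k).getD k' v = if k' = k then v else d.getD k' v := by
  simp only [PySem.Dict.getD, dict_get?_erase]
  split <;> rfl

theorem dict_contains_erase {κ ν : Type} [BEq κ] [LawfulBEq κ] [DecidableEq κ] (d : PySem.Dict κ ν) (k k' : κ) :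
    (d.erase k).contains k' = if k' = k then false else d.contains k' := by
  rw [PySem.Dict.contains_eq_isSome_get?, dict_get?_erase]
  split
  · rfl
  · rw [PySem.Dict.contains_eq_isSome_get?]

-- the indices 0..len(guess)-1 read through both strings are exactly the zipped pairs
theorem zip_eq_map_range (g s : List Char) (h : g.length ≤ s.length) :
    (List.range g.length).map (fun k => (g.getD k ' ', s.getD k ' ')) = g.zip s := by
  induction g generalizing s with
  | nil => simp
  | cons c g' ih =>
    cases s with
    | nil => simp at h
    | cons e s' =>
      simp only [List.length_cons, List.range_succ_eq_map, List.map_cons, List.map_map]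
      simp only [List.getD_cons_zero, List.zip_cons_cons]
      congr 1
      have := ih s' (by simpa using h)
      simpa [Function.comp_def] using this

theorem foldl_idx {σ : Type} (g s : List Char) (h : g.length ≤ s.length)
    (F : σ → Char → Char → σ) (init : σ) :
    (PySem.List.pyRange 0 (g.length : Int) 1).foldl
        (fun st i => F st (PySem.List.pyGetD g i ' ') (PySem.List.pyGetD s i ' ')) init
    = (g.zip s).foldl (fun st p => F st p.1 p.2) init := by
  rw [PySem.List.pyRange_zero_natCast, List.foldl_map]
  simp only [PySem.List.pyGetD_natCast]
  rw [← zip_eq_map_range g s h, List.foldl_map]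

theorem filtermap_idx {α : Type} (g s : List Char) (h : g.length ≤ s.length)
    (P : Char → Char → Bool) (F : Char → Char → α) :
    ((PySem.List.pyRange 0 (g.length : Int) 1).filter
        (fun i => P (PySem.List.pyGetD g i ' ') (PySem.List.pyGetD s i ' '))).map
        (fun i => F (PySem.List.pyGetD g i ' ') (PySem.List.pyGetD s i ' '))
    = ((g.zip s).filter (fun p => P p.1 p.2)).map (fun p => F p.1 p.2) := by
  rw [PySem.List.pyRange_zero_natCast, List.filter_map, List.map_map]
  simp only [Function.comp_def, PySem.List.pyGetD_natCast]
  rw [← zip_eq_map_range g s h, List.filter_map, List.map_map]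
  rfl

-- A's "if c not in d: d[c]=0 ; d[c]+=1" is one counting insert
theorem upd_eq (d : PySem.Dict Char Int) (c : Char) :
    (if d.contains c then d else d.insert c 0).insert c
        ((if d.contains c then d else d.insert c 0).getD c 0 + 1)
    = d.insert c (d.getD c 0 + 1) := by
  by_cases h : d.contains c = true
  · simp [h]
  · simp only [h, if_neg, Bool.not_eq_true]
    rw [PySem.Dict.insert_insert_self, PySem.Dict.getD_insert_self,
        PySem.Dict.getD_of_not_contains _ _ (by simpa using h)]

-- A's second loop over a dict representing the multiset m counts |xs ∩ m|
theorem loop2_count (xs : List Char) : ∀ (m : Multiset Char) (d : PySem.Dict Char Int) (p0 : Int),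
    (∀ c, d.contains c = decide (c ∈ m)) → (∀ c, d.getD c 0 = (m.count c : Int)) →
    (xs.foldl (fun (st : Int × PySem.Dict Char Int) c =>
       if st.2.contains c then
         let d' := st.2.insert c (st.2.getD c 0 - 1)
         if d'.getD c 0 = 0 then (st.1 + 1, d'.erase c) else (st.1 + 1, d')
       else st) (p0, d)).1 = p0 + (((xs : Multiset Char)) ∩ m).card := by
  induction xs with
  | nil => intro m d p0 h1 h2; simp
  | cons c xs ih =>
    intro m d p0 h1 h2
    by_cases hc : c ∈ m
    · have hcont : d.contains c = true := by rw [h1]; simp [hc]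
      have hcnt : 1 ≤ m.count c := Multiset.one_le_count_iff_mem.mpr hc
      simp only [List.foldl_cons, hcont, if_true]
      have hgd : (d.insert c (d.getD c 0 - 1)).getD c 0 = ((m.count c : Int) - 1) := by
        rw [PySem.Dict.getD_insert_self, h2]
      by_cases hone : m.count c = 1
      · rw [if_pos (by rw [hgd, hone]; norm_num)]
        rw [ih (m.erase c) _ (p0 + 1) ?_ ?_]
        · rw [← Multiset.cons_coe, Multiset.cons_inter_of_pos _ hc, Multiset.card_cons]
          push_cast; ring
        · intro c'
          rw [dict_contains_erase]
          by_cases hcc : c' = c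
          · rw [if_pos hcc, hcc]
            symm
            simp only [decide_eq_false_iff_not, ← Multiset.count_eq_zero]
            rw [Multiset.count_erase_self, hone]
          · rw [if_neg hcc, PySem.Dict.contains_insert, h1]
            simp [hcc, Multiset.mem_erase_of_ne hcc]
        · intro c'
          rw [dict_getD_erase]
          by_cases hcc : c' = c
          · rw [if_pos hcc, hcc]
            simp [Multiset.count_erase_self, hone]
          · rw [if_neg hcc, PySem.Dict.getD_insert, if_neg hcc, h2,
                Multiset.count_erase_of_ne hcc]
      · rw [if_neg (by rw [hgd]; omega)]
        rw [ih (m.erase c) _ (p0 + 1) ?_ ?_]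
        · rw [← Multiset.cons_coe, Multiset.cons_inter_of_pos _ hc, Multiset.card_cons]
          push_cast; ring
        · intro c'
          rw [PySem.Dict.contains_insert]
          by_cases hcc : c' = c
          · rw [hcc]
            have hm : c ∈ m.erase c := by
              rw [← Multiset.count_pos, Multiset.count_erase_self]; omega
            simp [hm]
          · rw [h1]
            simp [hcc, Multiset.mem_erase_of_ne hcc]
        · intro c'
          rw [PySem.Dict.getD_insert]
          by_cases hcc : c' = c
          · rw [if_pos hcc, hcc, h2, Multiset.count_erase_self]
            omega
          · rw [if_neg hcc, h2, Multiset.count_erase_of_ne hcc]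
    · have hcont : d.contains c = false := by rw [h1]; simp [hc]
      simp only [List.foldl_cons, hcont, Bool.false_eq_true, if_false]
      rw [ih m d p0 h1 h2, ← Multiset.cons_coe, Multiset.cons_inter_of_neg _ hc]

-- B's min-sum over the distinct mismatched guess chars is |xs ∩ ys|
theorem sum_min_counts (xs ys : List Char) :
    ((PySem.Set.ofList xs).map (fun c =>
        min ((xs.count c : Int)) ((ys.count c : Int)))).sum
    = ((((xs : Multiset Char)) ∩ ((ys : Multiset Char))).card : Int) := by
  have hnd := PySem.Set.nodup_ofList xs
  have key : ∀ a : Char, min ((xs.count a : Int)) ((ys.count a : Int))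
      = ((((xs : Multiset Char) ∩ (ys : Multiset Char)).count a : Int)) := by
    intro a
    rw [Multiset.count_inter]
    push_cast
    simp
  calc ((PySem.Set.ofList xs).map (fun c => min ((xs.count c : Int)) ((ys.count c : Int)))).sum
      = ∑ a ∈ (PySem.Set.ofList xs).toFinset, min ((xs.count a : Int)) ((ys.count a : Int)) := by
        rw [List.sum_toFinset _ hnd]
    _ = ∑ a ∈ xs.toFinset, ((((xs : Multiset Char) ∩ (ys : Multiset Char)).count a : Int)) := by
        refine Finset.sum_congr ?_ (fun a _ => key a)
        ext a
        simp [PySem.Set.mem_ofList]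
    _ = ((∑ a ∈ xs.toFinset, (((xs : Multiset Char) ∩ (ys : Multiset Char)).count a) : ℕ) : Int) := by
        push_cast
        rfl
    _ = ((((xs : Multiset Char)) ∩ ((ys : Multiset Char))).card : Int) := by
        congr 1
        rw [← Multiset.toFinset_sum_count_eq ((xs : Multiset Char) ∩ (ys : Multiset Char))]
        symm
        apply Finset.sum_subset
        · intro a ha
          simp only [Multiset.mem_toFinset, Multiset.mem_inter, Multiset.mem_coe] at ha
          simpa [List.mem_toFinset] using ha.1
        · intro a _ ha
          rw [Multiset.count_eq_zero]
          simpa [Multiset.mem_toFinset] using ha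

-- canonical value of both programs: hits = matching positions, pseudohits = |gms ∩ sms|
def pvCanon (guess solution : String) : Int × Int :=
  let z := guess.toList.zip solution.toList
  let zm := z.filter (fun p => decide (¬ p.1 = p.2))
  (((z.countP (fun p => decide (p.1 = p.2))) : Int),
   (((((zm.map (fun p => p.1)) : List Char) : Multiset Char) ∩
     (((zm.map (fun p => p.2)) : List Char) : Multiset Char)).card : Int))

-- A's first loop = (match count, counter of mismatched solution chars)
theorem stage1 (z : List (Char × Char)) :
    z.foldl (fun (st : Int × PySem.Dict Char Int) p =>
      if p.1 = p.2 then (st.1 + 1, st.2)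
      else (st.1, (if st.2.contains p.2 then st.2 else st.2.insert p.2 0).insert p.2
        ((if st.2.contains p.2 then st.2 else st.2.insert p.2 0).getD p.2 0 + 1)))
      (0, PySem.Dict.empty)
    = (((z.countP (fun p => decide (p.1 = p.2))) : Int),
       PySem.Dict.counter ((z.filter (fun p => decide (¬ p.1 = p.2))).map (fun p => p.2))) := by
  rw [PySem.List.foldl_congr_mem _ _
      (fun (st : Int × PySem.Dict Char Int) (p : Char × Char) =>
        ((fun (a : Int) (p : Char × Char) => if p.1 = p.2 then a + 1 else a) st.1 p,
         (fun (d : PySem.Dict Char Int) (p : Char × Char) =>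
            if ¬ p.1 = p.2 then d.insert p.2 (d.getD p.2 0 + 1) else d) st.2 p)) _
      (by
        intro st p _
        by_cases hp : p.1 = p.2
        · simp [hp]
        · simp only [hp, if_false, not_false_iff, if_true]
          rw [upd_eq])]
  rw [PySem.List.foldl_prod_mk
      (f := fun (a : Int) (p : Char × Char) => if p.1 = p.2 then a + 1 else a)
      (g := fun (d : PySem.Dict Char Int) (p : Char × Char) =>
        if ¬ p.1 = p.2 then d.insert p.2 (d.getD p.2 0 + 1) else d)]
  refine Prod.ext ?_ ?_
  · simp only
    rw [PySem.List.foldl_ite_add_one, zero_add]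
  · simp only
    rw [PySem.List.foldl_ite_eq_foldl_filter (p := fun p : Char × Char => ¬ p.1 = p.2)]
    rw [← List.foldl_map (f := fun p : Char × Char => p.2)
        (g := fun (d : PySem.Dict Char Int) (c : Char) => d.insert c (d.getD c 0 + 1))]
    rw [PySem.Dict.foldl_insert_getD_add_one_eq_counter]

-- A's second loop over the counter of ys counts the multiset intersection
theorem stage2 (z : List (Char × Char)) (ys : List Char) :
    (z.foldl (fun (st : Int × PySem.Dict Char Int) p =>
      if ¬ p.1 = p.2 ∧ st.2.contains p.1 then
        if (st.2.insert p.1 (st.2.getD p.1 0 - 1)).getD p.1 0 = 0 then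
          (st.1 + 1, (st.2.insert p.1 (st.2.getD p.1 0 - 1)).erase p.1)
        else (st.1 + 1, st.2.insert p.1 (st.2.getD p.1 0 - 1))
      else st) (0, PySem.Dict.counter ys)).1
    = (((((z.filter (fun p => decide (¬ p.1 = p.2))).map (fun p => p.1) : List Char) : Multiset Char) ∩
        ((ys : List Char) : Multiset Char)).card : Int) := by
  rw [PySem.List.foldl_congr_mem _ _
      (fun (st : Int × PySem.Dict Char Int) (p : Char × Char) =>
        if ¬ p.1 = p.2 then
          (fun (st : Int × PySem.Dict Char Int) (c : Char) =>
            if st.2.contains c then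
              if (st.2.insert c (st.2.getD c 0 - 1)).getD c 0 = 0 then
                (st.1 + 1, (st.2.insert c (st.2.getD c 0 - 1)).erase c)
              else (st.1 + 1, st.2.insert c (st.2.getD c 0 - 1))
            else st) st p.1
        else st) _
      (by
        intro st p _
        by_cases hp : p.1 = p.2
        · simp [hp]
        · by_cases hcont : st.2.contains p.1 = true <;>
            simp [hp, hcont])]
  rw [PySem.List.foldl_ite_eq_foldl_filter (p := fun p : Char × Char => ¬ p.1 = p.2)]
  rw [← List.foldl_map (f := fun p : Char × Char => p.1)
      (g := fun (st : Int × PySem.Dict Char Int) (c : Char) =>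
        if st.2.contains c then
          if (st.2.insert c (st.2.getD c 0 - 1)).getD c 0 = 0 then
            (st.1 + 1, (st.2.insert c (st.2.getD c 0 - 1)).erase c)
          else (st.1 + 1, st.2.insert c (st.2.getD c 0 - 1))
        else st)]
  rw [loop2_count _ (ys : Multiset Char) _ 0 ?_ ?_]
  · rw [zero_add]
  · intro c
    rw [PySem.Dict.contains_counter]
    simp
  · intro c
    rw [PySem.Dict.getD_counter]
    simp

theorem A_eq (guess solution : String) (h : guess.toList.length ≤ solution.toList.length) :
    masterMind guess solution = pvCanon guess solution := by
  simp only [masterMind, pvCanon]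
  rw [foldl_idx guess.toList solution.toList h
      (fun (st : Int × PySem.Dict Char Int) a b =>
        if a = b then (st.1 + 1, st.2)
        else (st.1, (if st.2.contains b then st.2 else st.2.insert b 0).insert b
          ((if st.2.contains b then st.2 else st.2.insert b 0).getD b 0 + 1)))
      (0, PySem.Dict.empty)]
  rw [stage1]
  rw [foldl_idx guess.toList solution.toList h
      (fun (st : Int × PySem.Dict Char Int) a b =>
        if ¬ a = b ∧ st.2.contains a then
          if (st.2.insert a (st.2.getD a 0 - 1)).getD a 0 = 0 then
            (st.1 + 1, (st.2.insert a (st.2.getD a 0 - 1)).erase a)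
          else (st.1 + 1, st.2.insert a (st.2.getD a 0 - 1))
        else st)
      (0, PySem.Dict.counter
            (((guess.toList.zip solution.toList).filter
                (fun p => decide (¬ p.1 = p.2))).map (fun p => p.2)))]
  rw [stage2]

theorem B_eq (guess solution : String) (h : guess.toList.length ≤ solution.toList.length) :
    masterMind_alt guess solution = pvCanon guess solution := by
  simp only [masterMind_alt, pvCanon]
  rw [filtermap_idx guess.toList solution.toList h
        (fun a b => a == b) (fun _ _ => (1 : Int)),
      filtermap_idx guess.toList solution.toList h
        (fun a b => a != b) (fun a _ => a),
      filtermap_idx guess.toList solution.toList h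
        (fun a b => a != b) (fun _ b => b)]
  rw [List.filter_congr (l := guess.toList.zip solution.toList)
        (p := fun p : Char × Char => p.1 != p.2)
        (q := fun p : Char × Char => decide (¬ p.1 = p.2))
        (by intro p _; by_cases hp : p.1 = p.2 <;> simp [hp]),
      List.filter_congr (l := guess.toList.zip solution.toList)
        (p := fun p : Char × Char => p.1 == p.2)
        (q := fun p : Char × Char => decide (p.1 = p.2))
        (by intro p _; by_cases hp : p.1 = p.2 <;> simp [hp])]
  rw [PySem.List.sum_map_const_int, ← List.countP_eq_length_filter, mul_one]
  rw [sum_min_counts]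

-- ===== VERDICT (by name: the statement is the Claim_ definition above) =====
theorem masterMind_spec : Claim_equal_masterMind := by
  unfold Claim_equal_masterMind
  intro guess solution _ hpre
  unfold Spec_masterMind
  unfold Pre_masterMind at hpre
  rw [A_eq guess solution hpre, B_eq guess solution hpre]
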